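-- pv_equiv track=rewrite | github.com/navoj/Variety_Puzzle_Solvers | Crossword/get_hints.py | number_grid
-- ===== SOURCE A (Python) =====
-- def number_grid(grid):
--     """Assign crossword numbering to the grid. Returns dict mapping (row,col) -> number."""
--     rows = len(grid)
--     cols = len(grid[0])
--     numbering = {}
--     num = 1
--
--     for r in range(rows):
--         for c in range(cols):
--             if grid[r][c] == '#':
--                 continue
--             starts_across = (c == 0 or grid[r][c-1] == '#') and (c + 1 < cols and grid[r][c+1] != '#')
--             starts_down = (r == 0 or grid[r-1][c] == '#') and (r + 1 < rows and grid[r+1][c] != '#')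
--             if starts_across or starts_down:
--                 numbering[(r, c)] = num
--                 num += 1
--
--     return numbering
-- ===== SOURCE B (Python) =====
-- def number_grid(grid):
--     """Assign crossword numbering to the grid. Returns dict mapping (row,col) -> number."""
--     rows = len(grid)
--     cols = len(grid[0])
--
--     starts = set()
--     # across starts: run-length scan of each row; a run reaching length 2 marks its first cell
--     for r in range(rows):
--         run = 0
--         for c in range(cols):
--             if grid[r][c] == '#':
--                 run = 0
--             else:
--                 run += 1
--                 if run == 2:
--                     starts.add((r, c - 1))
--     # down starts: same scan per column
--     for c in range(cols):
--         run = 0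
--         for r in range(rows):
--             if grid[r][c] == '#':
--                 run = 0
--             else:
--                 run += 1
--                 if run == 2:
--                     starts.add((r - 1, c))
--
--     numbering = {}
--     num = 1
--     for r in range(rows):
--         for c in range(cols):
--             if (r, c) in starts:
--                 numbering[(r, c)] = num
--                 num += 1
--     return numbering
-- ===== Notes on version B (the rewrite author's own statement) =====
-- stated objective: alternative
-- what changed: Replaces per-cell neighbour tests with two run-length scans (rows then columns) that collect start cells of runs of length >= 2 into a set, followed by a row-major renumbering pass over that set.
-- outside the precondition, e.g. on number_grid([]): A raises IndexError, B raises IndexError; on number_grid(['ab', 'a']): A raises IndexError, B raises IndexError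
import Mathlib
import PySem

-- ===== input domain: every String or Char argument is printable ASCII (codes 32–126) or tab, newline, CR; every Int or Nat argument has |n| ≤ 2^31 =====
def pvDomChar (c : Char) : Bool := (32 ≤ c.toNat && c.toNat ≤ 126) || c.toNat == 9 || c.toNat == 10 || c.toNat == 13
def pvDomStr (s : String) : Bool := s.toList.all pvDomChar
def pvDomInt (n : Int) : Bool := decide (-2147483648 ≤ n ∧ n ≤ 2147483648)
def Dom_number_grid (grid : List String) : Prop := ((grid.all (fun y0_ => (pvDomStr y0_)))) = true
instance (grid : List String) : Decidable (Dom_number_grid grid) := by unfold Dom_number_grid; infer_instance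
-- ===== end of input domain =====

-- B replaces A's per-cell neighbour tests by two run-length scans (rows, then columns) that
-- collect the start cells of runs of length ≥ 2 into a set, then numbers that set row-major.
-- Equivalence is about the RETURN value (the dict rendered as insertion-order triples (r, c, num)).

-- ===== PORT A =====
-- grid[r][c]; the .getD defaults never fire on the indices reached under Pre_number_grid
def pvCell (grid : List String) (r c : Int) : Char :=
  (PySem.List.pyGet? (((PySem.List.pyGet? grid r).getD "").toList) c).getD ' '

def number_grid (grid : List String) : List (Int × Int × Int) :=
  let rows : Int := grid.length
  let cols : Int := (((PySem.List.pyGet? grid 0).getD "").toList.length : Int)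
  -- dict (r,c) -> num kept as insertion-order triples; each key is visited once, so insert = append
  ((PySem.List.pyRange 0 rows 1).foldl (fun (st : List (Int × Int × Int) × Int) r =>
    (PySem.List.pyRange 0 cols 1).foldl (fun st c =>
      if pvCell grid r c = '#' then st
      else
        if ((c = 0 ∨ pvCell grid r (c-1) = '#') ∧ (c + 1 < cols ∧ pvCell grid r (c+1) ≠ '#'))  -- starts_across
          ∨ ((r = 0 ∨ pvCell grid (r-1) c = '#') ∧ (r + 1 < rows ∧ pvCell grid (r+1) c ≠ '#')) -- starts_down
        then (st.1 ++ [(r, c, st.2)], st.2 + 1) else st) st)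
    ([], 1)).1

-- ===== PORT B =====
def number_grid_alt (grid : List String) : List (Int × Int × Int) :=
  let rows : Int := grid.length
  let cols : Int := (((PySem.List.pyGet? grid 0).getD "").toList.length : Int)
  -- across starts: run-length scan of each row
  let s1 : PySem.Set (Int × Int) :=
    (PySem.List.pyRange 0 rows 1).foldl (fun acc r =>
      ((PySem.List.pyRange 0 cols 1).foldl (fun (st : Int × PySem.Set (Int × Int)) c =>
        if pvCell grid r c = '#' then (0, st.2)
        else if st.1 + 1 = 2 then (st.1 + 1, PySem.Set.add st.2 (r, c - 1))
        else (st.1 + 1, st.2)) (0, acc)).2) PySem.Set.empty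
  -- down starts: same scan per column
  let s2 : PySem.Set (Int × Int) :=
    (PySem.List.pyRange 0 cols 1).foldl (fun acc c =>
      ((PySem.List.pyRange 0 rows 1).foldl (fun (st : Int × PySem.Set (Int × Int)) r =>
        if pvCell grid r c = '#' then (0, st.2)
        else if st.1 + 1 = 2 then (st.1 + 1, PySem.Set.add st.2 (r - 1, c))
        else (st.1 + 1, st.2)) (0, acc)).2) s1
  -- row-major renumbering of the start set
  ((PySem.List.pyRange 0 rows 1).foldl (fun (st : List (Int × Int × Int) × Int) r =>
    (PySem.List.pyRange 0 cols 1).foldl (fun st c =>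
      if PySem.Set.contains s2 (r, c) then (st.1 ++ [(r, c, st.2)], st.2 + 1) else st) st)
    ([], 1)).1

-- ===== PRECONDITION & SPEC =====
-- Pre_ excludes exactly the inputs where the Python A raises IndexError: the empty grid
-- (len(grid[0])) and ragged grids in which some row is shorter than row 0.  (Both ports read
-- cells through the same total pvCell, so the proved equality happens not to need Pre_.)
def Pre_number_grid (grid : List String) : Prop :=
  grid ≠ [] ∧ ∀ s ∈ grid, (grid.headD "").toList.length ≤ s.toList.length
instance (grid : List String) : Decidable (Pre_number_grid grid) := by
  unfold Pre_number_grid; infer_instance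

def pvWitness_number_grid : List String := ["ab#", "cd#", "#.e"]

def Spec_number_grid (grid : List String) (out : List (Int × Int × Int)) : Prop := out = number_grid_alt grid
instance (grid : List String) (out : List (Int × Int × Int)) : Decidable (Spec_number_grid grid out) := by unfold Spec_number_grid; infer_instance

-- ===== CLAIM (what is proved, stated in full; the proofs are below) =====
def Claim_equal_number_grid : Prop := ∀ (grid : List String), Dom_number_grid grid → Pre_number_grid grid → Spec_number_grid grid (number_grid grid)

-- ===== LEMMAS AND PROOFS =====

-- run length of consecutive non-'#' cells ending just before index n, along the line f
def pvRunF (f : Nat → Char) : Nat → Int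
  | 0 => 0
  | n+1 => if f n = '#' then 0 else pvRunF f n + 1

-- the inner run-length scan of port B, as structural recursion on the number of steps
def pvScan (f : Nat → Char) (mk : Nat → Int × Int) (acc : PySem.Set (Int × Int)) :
    Nat → Int × PySem.Set (Int × Int)
  | 0 => (0, acc)
  | n+1 =>
    let st := pvScan f mk acc n
    if f n = '#' then (0, st.2)
    else if st.1 + 1 = 2 then (st.1 + 1, PySem.Set.add st.2 (mk n))
    else (st.1 + 1, st.2)

-- one whole pass (all rows, or all columns) of port B
def pvPass (f : Nat → Nat → Char) (mk : Nat → Nat → Int × Int) (n : Nat)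
    (acc0 : PySem.Set (Int × Int)) : Nat → PySem.Set (Int × Int)
  | 0 => acc0
  | m+1 => (pvScan (f m) (mk m) (pvPass f mk n acc0 m) n).2

theorem pvRunF_nonneg (f : Nat → Char) (n : Nat) : 0 ≤ pvRunF f n := by
  induction n with
  | zero => simp [pvRunF]
  | succ m ih => simp only [pvRunF]; split <;> omega

theorem pvRunF_eq_zero (f : Nat → Char) (n : Nat) :
    pvRunF f n = 0 ↔ (n = 0 ∨ f (n-1) = '#') := by
  cases n with
  | zero => simp [pvRunF]
  | succ m =>
    have := pvRunF_nonneg f m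
    simp only [pvRunF]
    split
    · simp_all
    · simp_all; omega

theorem pvRunF_succ_eq_one (f : Nat → Char) (n : Nat) :
    pvRunF f (n+1) = 1 ↔ (f n ≠ '#' ∧ (n = 0 ∨ f (n-1) = '#')) := by
  have hz := pvRunF_eq_zero f n
  have := pvRunF_nonneg f n
  simp only [pvRunF]
  split
  · simp_all
  · simp_all

theorem pvScan_fst (f : Nat → Char) (mk : Nat → Int × Int) (acc : PySem.Set (Int × Int))
    (n : Nat) : (pvScan f mk acc n).1 = pvRunF f n := by
  induction n with
  | zero => simp [pvScan, pvRunF]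
  | succ m ih =>
    simp only [pvScan, pvRunF]
    split
    · simp
    · split <;> simp [ih]

theorem mem_pvScan (f : Nat → Char) (mk : Nat → Int × Int) (acc : PySem.Set (Int × Int))
    (n : Nat) (p : Int × Int) :
    p ∈ (pvScan f mk acc n).2 ↔
      p ∈ acc ∨ ∃ j, j < n ∧ f j ≠ '#' ∧ pvRunF f j = 1 ∧ p = mk j := by
  induction n with
  | zero => simp [pvScan]
  | succ m ih =>
    have hfst := pvScan_fst f mk acc m
    simp only [pvScan]
    by_cases h1 : f m = '#'
    · rw [if_pos h1]
      dsimp only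
      rw [ih]
      constructor
      · rintro (h | ⟨j, hj, hx⟩)
        · exact Or.inl h
        · exact Or.inr ⟨j, by omega, hx⟩
      · rintro (h | ⟨j, hj, hx⟩)
        · exact Or.inl h
        · rcases Nat.lt_succ_iff_lt_or_eq.mp hj with h' | rfl
          · exact Or.inr ⟨j, h', hx⟩
          · exact absurd h1 hx.1
    · rw [if_neg h1]
      by_cases h2 : (pvScan f mk acc m).1 + 1 = 2
      · rw [if_pos h2]
        have hrun : pvRunF f m = 1 := by rw [← hfst]; omega
        dsimp only
        rw [PySem.Set.mem_add, ih]
        constructor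
        · rintro ((h | ⟨j, hj, hx⟩) | rfl)
          · exact Or.inl h
          · exact Or.inr ⟨j, by omega, hx⟩
          · exact Or.inr ⟨m, by omega, h1, hrun, rfl⟩
        · rintro (h | ⟨j, hj, hx⟩)
          · exact Or.inl (Or.inl h)
          · rcases Nat.lt_succ_iff_lt_or_eq.mp hj with h' | rfl
            · exact Or.inl (Or.inr ⟨j, h', hx⟩)
            · exact Or.inr hx.2.2
      · rw [if_neg h2]
        have hrun : pvRunF f m ≠ 1 := by rw [← hfst]; omega
        dsimp only
        rw [ih]
        constructor
        · rintro (h | ⟨j, hj, hx⟩)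
          · exact Or.inl h
          · exact Or.inr ⟨j, by omega, hx⟩
        · rintro (h | ⟨j, hj, hx⟩)
          · exact Or.inl h
          · rcases Nat.lt_succ_iff_lt_or_eq.mp hj with h' | rfl
            · exact Or.inr ⟨j, h', hx⟩
            · exact absurd hx.2.1 hrun

theorem mem_pvPass (f : Nat → Nat → Char) (mk : Nat → Nat → Int × Int) (n : Nat)
    (acc0 : PySem.Set (Int × Int)) (m : Nat) (p : Int × Int) :
    p ∈ pvPass f mk n acc0 m ↔
      p ∈ acc0 ∨ ∃ i, i < m ∧ ∃ j, j < n ∧ f i j ≠ '#' ∧ pvRunF (f i) j = 1 ∧ p = mk i j := by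
  induction m with
  | zero => simp [pvPass]
  | succ k ih =>
    simp only [pvPass]
    rw [mem_pvScan, ih]
    constructor
    · rintro ((h | ⟨i, hi, hx⟩) | ⟨j, hj, h1, h2, h3⟩)
      · exact Or.inl h
      · exact Or.inr ⟨i, by omega, hx⟩
      · exact Or.inr ⟨k, by omega, j, hj, h1, h2, h3⟩
    · rintro (h | ⟨i, hi, hx⟩)
      · exact Or.inl (Or.inl h)
      · rcases Nat.lt_succ_iff_lt_or_eq.mp hi with h' | rfl
        · exact Or.inl (Or.inr ⟨i, h', hx⟩)
        · exact Or.inr hx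

-- bridge: a foldl over range(0, n) with n a Nat cast is a foldl over List.range n
theorem foldl_pyRange_nat {β : Type} (g : β → Int → β) (init : β) (n : Nat) :
    (PySem.List.pyRange 0 (n : Int) 1).foldl g init
      = (List.range n).foldl (fun b (k : Nat) => g b (k : Int)) init := by
  rw [PySem.List.pyRange_one, List.foldl_map]
  simp only [Int.sub_zero, Int.toNat_natCast, zero_add]

-- bridge: port B's inner scan over List.range is pvScan
theorem foldl_range_scan (g : Int → Char) (mkI : Int → Int × Int)
    (acc : PySem.Set (Int × Int)) (n : Nat) :
    (List.range n).foldl (fun (st : Int × PySem.Set (Int × Int)) (k : Nat) =>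
        if g (k : Int) = '#' then (0, st.2)
        else if st.1 + 1 = 2 then (st.1 + 1, PySem.Set.add st.2 (mkI (k : Int)))
        else (st.1 + 1, st.2)) (0, acc)
      = pvScan (fun k => g (k : Int)) (fun k => mkI (k : Int)) acc n := by
  induction n with
  | zero => simp [pvScan]
  | succ m ih => rw [List.range_succ, List.foldl_append, ih]; rfl

-- whole passes of port B, folded into pvPass
theorem pass_fold_eq (gcell : Int → Int → Char) (mkI : Int → Int → Int × Int) (R C : Nat)
    (acc0 : PySem.Set (Int × Int)) :
    (PySem.List.pyRange 0 (R : Int) 1).foldl (fun acc r =>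
      ((PySem.List.pyRange 0 (C : Int) 1).foldl (fun (st : Int × PySem.Set (Int × Int)) c =>
        if gcell r c = '#' then (0, st.2)
        else if st.1 + 1 = 2 then (st.1 + 1, PySem.Set.add st.2 (mkI r c))
        else (st.1 + 1, st.2)) (0, acc)).2) acc0
    = pvPass (fun i j => gcell (i : Int) (j : Int)) (fun i j => mkI (i : Int) (j : Int)) C acc0 R := by
  rw [foldl_pyRange_nat]
  induction R with
  | zero => simp [pvPass]
  | succ m ih =>
    rw [List.range_succ, List.foldl_append, ih]
    simp only [List.foldl_cons, List.foldl_nil, pvPass]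
    rw [foldl_pyRange_nat, foldl_range_scan]

-- the heart: membership in B's start set is exactly A's per-cell start condition
theorem cond_iff (grid : List String) (C : Nat) (r c : Int)
    (hr0 : 0 ≤ r) (hrR : r < (grid.length : Int))
    (hc0 : 0 ≤ c) (hcC : c < (C : Int)) :
    (r, c) ∈ pvPass (fun i j => pvCell grid (j : Int) (i : Int))
        (fun i j => ((j : Int) - 1, (i : Int))) grid.length
        (pvPass (fun i j => pvCell grid (i : Int) (j : Int))
          (fun i j => ((i : Int), (j : Int) - 1)) C PySem.Set.empty grid.length) C ↔
      (pvCell grid r c ≠ '#' ∧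
        (((c = 0 ∨ pvCell grid r (c-1) = '#') ∧ (c + 1 < (C : Int) ∧ pvCell grid r (c+1) ≠ '#'))
         ∨ ((r = 0 ∨ pvCell grid (r-1) c = '#') ∧ (r + 1 < (grid.length : Int) ∧ pvCell grid (r+1) c ≠ '#')))) := by
  rw [mem_pvPass, mem_pvPass]
  constructor
  · rintro ((h | ⟨i, hi, j, hj, hne, hrun, hp⟩) | ⟨i, hi, j, hj, hne, hrun, hp⟩)
    · cases h
    · -- across start recorded by the row pass
      obtain ⟨j', rfl⟩ : ∃ j'', j = j'' + 1 := by
        cases j with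
        | zero => simp [pvRunF] at hrun
        | succ jj => exact ⟨jj, rfl⟩
      rw [pvRunF_succ_eq_one] at hrun
      obtain ⟨h1, h2⟩ := hrun
      rw [Prod.mk.injEq] at hp
      obtain ⟨rfl, rfl⟩ := hp
      have hc' : ((j' + 1 : Nat) : Int) - 1 = (j' : Int) := by push_cast; ring
      rw [hc']
      refine ⟨h1, Or.inl ⟨?_, ?_, ?_⟩⟩
      · by_cases hj0 : j' = 0
        · subst hj0; exact Or.inl (by simp)
        · rcases h2 with h2 | h2
          · exact absurd h2 hj0
          · refine Or.inr ?_
            have : ((j' - 1 : Nat) : Int) = (j' : Int) - 1 := by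
              push_cast [Nat.cast_sub (Nat.one_le_iff_ne_zero.mpr hj0)]; ring
            rw [← this]; exact h2
      · exact_mod_cast hj
      · have : ((j' + 1 : Nat) : Int) = (j' : Int) + 1 := by push_cast; ring
        rw [← this]; exact hne
    · -- down start recorded by the column pass
      obtain ⟨j', rfl⟩ : ∃ j'', j = j'' + 1 := by
        cases j with
        | zero => simp [pvRunF] at hrun
        | succ jj => exact ⟨jj, rfl⟩
      rw [pvRunF_succ_eq_one] at hrun
      obtain ⟨h1, h2⟩ := hrun
      rw [Prod.mk.injEq] at hp
      obtain ⟨rfl, rfl⟩ := hp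
      have hr' : ((j' + 1 : Nat) : Int) - 1 = (j' : Int) := by push_cast; ring
      rw [hr']
      refine ⟨h1, Or.inr ⟨?_, ?_, ?_⟩⟩
      · by_cases hj0 : j' = 0
        · subst hj0; exact Or.inl (by simp)
        · rcases h2 with h2 | h2
          · exact absurd h2 hj0
          · refine Or.inr ?_
            have : ((j' - 1 : Nat) : Int) = (j' : Int) - 1 := by
              push_cast [Nat.cast_sub (Nat.one_le_iff_ne_zero.mpr hj0)]; ring
            rw [← this]; exact h2
      · exact_mod_cast hj
      · have : ((j' + 1 : Nat) : Int) = (j' : Int) + 1 := by push_cast; ring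
        rw [← this]; exact hne
  · rintro ⟨hcell, (⟨h01, hlt, hnext⟩ | ⟨h01, hlt, hnext⟩)⟩
    · -- across: witness in the row pass
      refine Or.inl (Or.inr ⟨r.toNat, by omega, c.toNat + 1, by omega, ?_, ?_, ?_⟩)
      · have e1 : ((r.toNat : Nat) : Int) = r := by omega
        have e2 : ((c.toNat + 1 : Nat) : Int) = c + 1 := by omega
        simpa only [e1, e2] using hnext
      · rw [pvRunF_succ_eq_one]
        have e1 : ((r.toNat : Nat) : Int) = r := by omega
        have e3 : ((c.toNat : Nat) : Int) = c := by omega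
        constructor
        · simpa only [e1, e3] using hcell
        · by_cases hcz : c = 0
          · exact Or.inl (by omega)
          · rcases h01 with h | h
            · exact absurd h hcz
            · refine Or.inr ?_
              have e4 : ((c.toNat - 1 : Nat) : Int) = c - 1 := by omega
              simpa only [e1, e4] using h
      · rw [Prod.mk.injEq]
        constructor <;> omega
    · -- down: witness in the column pass
      refine Or.inr ⟨c.toNat, by omega, r.toNat + 1, by omega, ?_, ?_, ?_⟩
      · have e1 : ((c.toNat : Nat) : Int) = c := by omega
        have e2 : ((r.toNat + 1 : Nat) : Int) = r + 1 := by omega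
        simpa only [e1, e2] using hnext
      · rw [pvRunF_succ_eq_one]
        have e1 : ((c.toNat : Nat) : Int) = c := by omega
        have e3 : ((r.toNat : Nat) : Int) = r := by omega
        constructor
        · simpa only [e1, e3] using hcell
        · by_cases hrz : r = 0
          · exact Or.inl (by omega)
          · rcases h01 with h | h
            · exact absurd h hrz
            · refine Or.inr ?_
              have e4 : ((r.toNat - 1 : Nat) : Int) = r - 1 := by omega
              simpa only [e1, e4] using h
      · rw [Prod.mk.injEq]
        constructor <;> omega

-- ===== VERDICT (by name: the statement is the Claim_ definition above) =====
theorem number_grid_spec : Claim_equal_number_grid := by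
  intro grid _ _
  unfold Spec_number_grid number_grid number_grid_alt
  dsimp only
  rw [pass_fold_eq, pass_fold_eq]
  refine congrArg Prod.fst ?_
  apply PySem.List.foldl_congr_mem
  intro st r hrm
  apply PySem.List.foldl_congr_mem
  intro st' c hcm
  rw [PySem.List.mem_pyRange_one] at hrm hcm
  have hmem := cond_iff grid _ r c hrm.1 hrm.2 hcm.1 hcm.2
  by_cases hm : (r, c) ∈ pvPass (fun i j => pvCell grid (j : Int) (i : Int))
      (fun i j => ((j : Int) - 1, (i : Int))) grid.length
      (pvPass (fun i j => pvCell grid (i : Int) (j : Int))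
        (fun i j => ((i : Int), (j : Int) - 1))
        ((PySem.List.pyGet? grid 0).getD "").toList.length PySem.Set.empty grid.length)
      ((PySem.List.pyGet? grid 0).getD "").toList.length
  · obtain ⟨hne, hstart⟩ := hmem.mp hm
    rw [if_neg hne, if_pos hstart, if_pos ((PySem.Set.contains_iff _ _).mpr hm)]
  · have hc3 : ¬ (PySem.Set.contains _ (r, c) = true) :=
      fun ht => hm ((PySem.Set.contains_iff _ _).mp ht)
    by_cases h1 : pvCell grid r c = '#'
    · rw [if_pos h1, if_neg hc3]
    · rw [if_neg h1, if_neg (fun hstart => hm (hmem.mpr ⟨h1, hstart⟩)), if_neg hc3]
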